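-- pv_equiv track=rewrite | github.com/ViolaLeee/DM-StreamData | AMS_Algorithm.py | computeValue
-- ===== SOURCE A (Python) =====
-- def computeValue(slist):
--     xval = []
--     for ii in range(len(slist)):
--         count = 0;
--         for j in range(len(slist) - ii):
--             if (slist[ii] == slist[ii + j]):
--                 count += 1
--         xval.append(count)
--     return xval
-- ===== SOURCE B (Python) =====
-- def computeValue(slist):
--     counts = {}
--     out = []
--     for x in reversed(slist):
--         c = counts.get(x, 0) + 1
--         counts[x] = c
--         out.append(c)
--     out.reverse()
--     return out
-- ===== Notes on version B (the rewrite author's own statement) =====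
-- stated objective: faster
-- what changed: Replaces A's per-index rescan of the whole suffix by a single right-to-left pass that keeps a dict of running counts per value and builds the output back-to-front.
import Mathlib
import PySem

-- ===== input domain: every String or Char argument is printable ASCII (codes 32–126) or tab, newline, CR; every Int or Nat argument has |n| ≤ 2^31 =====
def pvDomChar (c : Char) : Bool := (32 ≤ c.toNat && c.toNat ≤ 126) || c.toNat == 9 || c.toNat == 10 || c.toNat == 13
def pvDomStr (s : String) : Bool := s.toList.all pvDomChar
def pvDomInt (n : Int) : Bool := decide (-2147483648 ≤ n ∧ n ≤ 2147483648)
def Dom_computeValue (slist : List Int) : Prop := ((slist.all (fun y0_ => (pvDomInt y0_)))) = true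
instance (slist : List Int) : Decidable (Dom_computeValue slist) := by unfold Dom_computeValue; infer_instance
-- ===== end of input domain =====

-- B replaces A's quadratic index-pair scan by one right-to-left pass keeping a dict of
-- running counts per value (objective: faster, O(n^2) → O(n)).

-- ===== PORT A =====
def computeValue (slist : List Int) : List Int :=
  (PySem.List.pyRange 0 (slist.length : Int)).foldl
    (fun xval ii =>
      let count : Int :=
        (PySem.List.pyRange 0 ((slist.length : Int) - ii)).foldl
          (fun count j =>
            if PySem.List.pyGetD slist ii 0 = PySem.List.pyGetD slist (ii + j) 0
            then count + 1 else count) 0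
      xval ++ [count]) []

-- ===== PORT B =====
def computeValue_alt (slist : List Int) : List Int :=
  let p := slist.reverse.foldl
    (fun (p : PySem.Dict Int Int × List Int) x =>
      let c := p.1.getD x 0 + 1
      (p.1.insert x c, p.2 ++ [c]))
    (PySem.Dict.empty, [])
  p.2.reverse

-- ===== PRECONDITION & SPEC =====
def Spec_computeValue (slist : List Int) (out : List Int) : Prop := out = computeValue_alt slist
instance (slist : List Int) (out : List Int) : Decidable (Spec_computeValue slist out) := by unfold Spec_computeValue; infer_instance

-- ===== CLAIM (what is proved, stated in full; the proofs are below) =====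
def Claim_equal_computeValue : Prop := ∀ (slist : List Int), Dom_computeValue slist → Spec_computeValue slist (computeValue slist)

-- ===== LEMMAS AND PROOFS =====

-- count of slist[i] in the suffix slist[i:], for each i, head first
def pvSuffCounts : List Int → List Int
  | [] => []
  | x :: xs => ((x :: xs).count x : Int) :: pvSuffCounts xs

-- inner count of A at index i equals the suffix count
theorem pvCountP_range_getD (t : List Int) (v : Int) :
    (List.range t.length).countP (fun j => decide (t.getD j 0 = v)) = t.count v := by
  induction t with
  | nil => simp
  | cons x xs ih =>
      rw [List.length_cons, List.range_succ_eq_map, List.countP_cons, List.countP_map,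
        List.count_cons]
      have h2 : List.countP ((fun j => decide ((x :: xs).getD j 0 = v)) ∘ Nat.succ)
            (List.range xs.length)
          = List.countP (fun j => decide (xs.getD j 0 = v)) (List.range xs.length) := by
        apply List.countP_congr; intro a _; simp [Function.comp]
      rw [h2, ih]
      by_cases h : x = v <;> simp [h]

theorem pvA_eq (l : List Int) :
    computeValue l = (List.range l.length).map (fun i => ((l.drop i).count (l.getD i 0) : Int)) := by
  unfold computeValue
  rw [PySem.List.pyRange_zero_natCast, List.foldl_map,
    PySem.List.foldl_append_singleton_eq_map]
  simp only [List.nil_append]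
  apply List.map_congr_left
  intro i hi
  simp only [List.mem_range] at hi
  have hsub : (l.length : Int) - (i : Int) = ((l.length - i : Nat) : Int) := by omega
  rw [hsub, PySem.List.pyRange_zero_natCast, List.foldl_map]
  have : ∀ (a : Int) (j : Nat),
      (if PySem.List.pyGetD l (↑i) 0 = PySem.List.pyGetD l (↑i + ↑j) 0 then a + 1 else a)
      = (if l.getD (i + j) 0 = l.getD i 0 then a + 1 else a) := by
    intro a j
    rw [show ((i : Int) + (j : Int)) = ((i + j : Nat) : Int) by push_cast; ring,
      PySem.List.pyGetD_natCast, PySem.List.pyGetD_natCast]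
    exact if_congr eq_comm rfl rfl
  rw [PySem.List.foldl_congr_mem
      (l := List.range (l.length - i)) (init := (0 : Int))
      (f := fun a j => if PySem.List.pyGetD l (↑i) 0 = PySem.List.pyGetD l (↑i + ↑j) 0 then a + 1 else a)
      (g := fun a j => if l.getD (i + j) 0 = l.getD i 0 then a + 1 else a)
      (by intro a j _; exact this a j)]
  rw [PySem.List.foldl_ite_add_one (fun j => l.getD (i + j) 0 = l.getD i 0)]
  have hdrop : ∀ j, (l.drop i).getD j 0 = l.getD (i + j) 0 := by
    intro j; rw [List.getD_eq_getElem?_getD, List.getD_eq_getElem?_getD,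
      List.getElem?_drop]
  have hc := pvCountP_range_getD (l.drop i) (l.getD i 0)
  rw [List.length_drop] at hc
  rw [← hc, zero_add]
  refine congrArg Nat.cast (List.countP_congr ?_)
  intro j _
  rw [show (List.getD (l.drop i) j 0) = l.getD (i + j) 0 from hdrop j]

theorem pvA_eq_suff (l : List Int) :
    (List.range l.length).map (fun i => ((l.drop i).count (l.getD i 0) : Int)) = pvSuffCounts l := by
  induction l with
  | nil => simp [pvSuffCounts]
  | cons x xs ih =>
      simp only [List.length_cons, List.range_succ_eq_map, List.map_cons, List.map_map,
        pvSuffCounts, List.cons.injEq]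
      refine ⟨by simp, ?_⟩
      rw [← ih]
      apply List.map_congr_left
      intro i _
      simp [Function.comp]

-- the dict component of B's fold is the plain counting fold
theorem pvBfold_fst (l : List Int) (d : PySem.Dict Int Int) (out : List Int) :
    (l.foldl (fun (p : PySem.Dict Int Int × List Int) x =>
        (p.1.insert x (p.1.getD x 0 + 1), p.2 ++ [p.1.getD x 0 + 1])) (d, out)).1
      = l.foldl (fun d x => d.insert x (d.getD x 0 + 1)) d := by
  induction l generalizing d out with
  | nil => rfl
  | cons x xs ih => exact ih _ _

theorem pvB_eq_suff (l : List Int) : computeValue_alt l = pvSuffCounts l := by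
  induction l with
  | nil => rfl
  | cons x xs ih =>
      unfold computeValue_alt at ih ⊢
      simp only [List.reverse_cons, List.foldl_append, List.foldl_cons, List.foldl_nil]
      have hfst := pvBfold_fst xs.reverse PySem.Dict.empty []
      have hd : (xs.reverse.foldl
          (fun (p : PySem.Dict Int Int × List Int) x =>
            (p.1.insert x (p.1.getD x 0 + 1), p.2 ++ [p.1.getD x 0 + 1]))
          (PySem.Dict.empty, [])).1.getD x 0 = (xs.count x : Int) := by
        rw [hfst, PySem.Dict.getD_foldl_insert_add_one]
        simp [PySem.Dict.getD_empty, List.count_reverse]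
      simp only [hd]
      rw [List.reverse_append]
      simp only [List.reverse_cons, List.reverse_nil, List.nil_append, List.cons_append,
        pvSuffCounts, List.cons.injEq]
      refine ⟨by rw [List.count_cons]; push_cast; simp, by simpa using ih⟩

-- ===== VERDICT (by name: the statement is the Claim_ definition above) =====
theorem computeValue_spec : Claim_equal_computeValue := by
  intro slist _
  unfold Spec_computeValue
  rw [pvA_eq, pvA_eq_suff, pvB_eq_suff]
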